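-- pv_equiv track=rewrite | github.com/erlanig/Porto_Erlan | PY/Tugas1-2.py | is_x_elmt_ke_n
-- ===== SOURCE A (Python) =====
-- def is_empty(L):
--     if L == []:
--         return True
--     else:
--         return False
--
-- def first_element(L):
--     if not(is_empty(L)):
--         return L[0]
--
-- def tail_element(L):
--     return L[1:]
--
-- def is_member(L, x):
--     if (is_empty(L)):
--         return False
--     else:
--         if first_element(L) == x:
--             return True
--         else:
--             return is_member(tail_element(L), x)
--
-- def prec(n):
--     return n-1
--
-- def is_x_elmt_ke_n(X,N,L):
--     if is_member(L,X):
--         if N == 1 and first_element(L) == X: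
--             return True
--         else:
--             return False or is_x_elmt_ke_n(X, prec(N), tail_element(L))
--     else:
--         return False
-- ===== SOURCE B (Python) =====
-- def is_x_elmt_ke_n(X, N, L):
--     # closed form: X is the N-th element iff N is a valid 1-based position and L[N-1] == X
--     return 1 <= N <= len(L) and L[N - 1] == X
-- ===== Notes on version B (the rewrite author's own statement) =====
-- stated objective: faster
-- what changed: Replaces the mutually recursive suffix walk with per-level membership scans by a single closed-form bounds check plus one index lookup L[N-1]==X.
import Mathlib
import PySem

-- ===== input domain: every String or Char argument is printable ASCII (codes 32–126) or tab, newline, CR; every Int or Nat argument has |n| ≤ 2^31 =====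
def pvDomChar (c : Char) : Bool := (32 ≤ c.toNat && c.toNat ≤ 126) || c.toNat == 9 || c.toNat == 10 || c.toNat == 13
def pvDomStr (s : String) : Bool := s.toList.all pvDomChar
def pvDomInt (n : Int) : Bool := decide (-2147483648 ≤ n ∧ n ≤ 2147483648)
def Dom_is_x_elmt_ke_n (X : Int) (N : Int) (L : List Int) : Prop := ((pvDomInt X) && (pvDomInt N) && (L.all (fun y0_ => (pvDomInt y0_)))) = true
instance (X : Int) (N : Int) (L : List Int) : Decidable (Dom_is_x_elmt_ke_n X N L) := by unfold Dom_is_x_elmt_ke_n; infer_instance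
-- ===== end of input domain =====

-- B: closed-form position check (1 ≤ N ≤ len L and L[N-1] == X) replacing A's
-- mutually recursive suffix walk with a membership scan at every level; faster.


-- ===== PORT A =====
def is_empty (L : List Int) : Bool :=
  if L == [] then true else false

def first_element (L : List Int) : Option Int :=
  if !(is_empty L) then PySem.List.pyGet? L 0 else none

def tail_element (L : List Int) : List Int :=
  PySem.List.slice L (some 1) none

def is_member (L : List Int) (x : Int) : Bool :=
  if is_empty L then false
  else
    if first_element L == some x then true
    else is_member (tail_element L) x
termination_by L.length
decreasing_by
  rename_i hne _
  cases L with
  | nil => simp [is_empty] at hne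
  | cons a t => simp [tail_element, PySem.List.slice_from_one]

def prec (n : Int) : Int := n - 1

def is_x_elmt_ke_n (X : Int) (N : Int) (L : List Int) : Bool :=
  if is_member L X then
    if N == 1 && first_element L == some X then true
    else false || is_x_elmt_ke_n X (prec N) (tail_element L)
  else false
termination_by L.length
decreasing_by
  rename_i hmem _
  cases L with
  | nil => rw [is_member] at hmem; simp [is_empty] at hmem
  | cons a t => simp [tail_element, PySem.List.slice_from_one]

-- ===== PORT B =====
def is_x_elmt_ke_n_alt (X : Int) (N : Int) (L : List Int) : Bool :=
  decide (1 ≤ N) && decide (N ≤ (L.length : Int)) && (PySem.List.pyGet? L (N - 1) == some X)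

-- ===== PRECONDITION & SPEC =====
def Spec_is_x_elmt_ke_n (X : Int) (N : Int) (L : List Int) (out : Bool) : Prop := out = is_x_elmt_ke_n_alt X N L
instance (X : Int) (N : Int) (L : List Int) (out : Bool) : Decidable (Spec_is_x_elmt_ke_n X N L out) := by unfold Spec_is_x_elmt_ke_n; infer_instance

-- ===== CLAIM (what is proved, stated in full; the proofs are below) =====
def Claim_equal_is_x_elmt_ke_n : Prop := ∀ (X : Int) (N : Int) (L : List Int), Dom_is_x_elmt_ke_n X N L → Spec_is_x_elmt_ke_n X N L (is_x_elmt_ke_n X N L)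

-- ===== LEMMAS AND PROOFS =====

theorem tail_element_cons (a : Int) (t : List Int) : tail_element (a :: t) = t := by
  simp [tail_element, PySem.List.slice_from_one]

theorem is_member_iff (L : List Int) (x : Int) : is_member L x = true ↔ x ∈ L := by
  induction L with
  | nil => simp [is_member, is_empty]
  | cons h t ih =>
    rw [is_member]
    simp [is_empty, first_element, tail_element, PySem.List.slice_from_one,
      PySem.List.pyGet?, PySem.List.pyIdx?, ih]
    constructor <;> rintro (rfl | hh) <;> simp_all

theorem a_eq_b (X : Int) (N : Int) (L : List Int) :
    is_x_elmt_ke_n X N L = is_x_elmt_ke_n_alt X N L := by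
  induction L generalizing N with
  | nil =>
    rw [is_x_elmt_ke_n]
    simp [is_member, is_empty, is_x_elmt_ke_n_alt, PySem.List.pyGet?, PySem.List.pyIdx?]
  | cons h t ih =>
    rw [is_x_elmt_ke_n]
    by_cases hm : is_member (h :: t) X = true
    · rw [if_pos hm]
      by_cases h1 : (N == 1 && first_element (h :: t) == some X) = true
      · rw [if_pos h1]
        simp [first_element, is_empty, PySem.List.pyGet?, PySem.List.pyIdx?] at h1
        obtain ⟨hn, hx⟩ := h1
        subst hn
        simp [is_x_elmt_ke_n_alt, PySem.List.pyGet?, PySem.List.pyIdx?, hx]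
      · rw [if_neg h1]
        simp only [Bool.false_or]
        rw [tail_element_cons, ih]
        simp [first_element, is_empty, PySem.List.pyGet?, PySem.List.pyIdx?] at h1
        simp only [is_x_elmt_ke_n_alt, prec]
        by_cases hN2 : 2 ≤ N
        · have h2 : 0 ≤ N - 2 := by omega
          obtain ⟨k, hk⟩ := Int.eq_ofNat_of_zero_le h2
          have hg : PySem.List.pyGet? (h :: t) (N - 1) = PySem.List.pyGet? t (N - 1 - 1) := by
            have e2 : N - 1 - 1 = (k : Int) := by omega
            have e1 : N - 1 = (k : Int) + 1 := by omega
            rw [e2, e1, PySem.List.pyGet?_cons_succ]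
          rw [hg, Bool.eq_iff_iff]
          simp only [Bool.and_eq_true, decide_eq_true_eq]
          constructor
          · rintro ⟨⟨ha, hb⟩, hc⟩
            refine ⟨⟨by omega, ?_⟩, hc⟩
            simp only [List.length_cons] at *; push_cast at *; omega
          · rintro ⟨⟨ha, hb⟩, hc⟩
            refine ⟨⟨by omega, ?_⟩, hc⟩
            simp only [List.length_cons] at *; push_cast at *; omega
        · by_cases hN1 : N = 1
          · subst hN1
            have hg0 : PySem.List.pyGet? (h :: t) (1 - 1) = some h := by
              norm_num [PySem.List.pyGet?, PySem.List.pyIdx?]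
            norm_num [hg0, h1 rfl]
          · have ha : ¬(1:Int) ≤ N := by omega
            have hb : ¬(1:Int) ≤ N - 1 := by omega
            simp [ha, hb]
    · rw [if_neg hm]
      rw [is_member_iff] at hm
      symm
      simp only [is_x_elmt_ke_n_alt]
      by_cases hc : PySem.List.pyGet? (h :: t) (N - 1) = some X
      · exact absurd (PySem.List.mem_of_pyGet?_eq_some _ hc) hm
      · simp [hc]

-- ===== VERDICT (by name: the statement is the Claim_ definition above) =====
theorem is_x_elmt_ke_n_spec : Claim_equal_is_x_elmt_ke_n := by
  intro X N L _
  unfold Spec_is_x_elmt_ke_n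
  exact a_eq_b X N L
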